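-- pv_equiv track=rewrite | github.com/juandavidjd/extrac | scripts/process_stores_v2.py | normalize_sku
-- ===== SOURCE A (Python) =====
-- def normalize_sku(sku):
--     if not sku:
--         return ''
--     sku = str(sku).replace('/', '-')
--     parts = sku.split('-')
--     normalized = []
--     for p in parts:
--         if p.isdigit():
--             normalized.append(str(int(p)))
--         else:
--             normalized.append(p)
--     return '-'.join(normalized)
-- ===== SOURCE B (Python) =====
-- def normalize_sku(sku):
--     if not sku:
--         return ''
--     out = ''
--     tok = ''
--     for ch in str(sku):
--         if ch == '-' or ch == '/':
--             out += _flush(tok) + '-'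
--             tok = ''
--         else:
--             tok += ch
--     return out + _flush(tok)
--
--
-- def _flush(tok):
--     return str(int(tok)) if tok.isdigit() else tok
-- ===== Notes on version B (the rewrite author's own statement) =====
-- stated objective: alternative
-- what changed: Single left-to-right character scan that flushes each token at a separator, instead of replace('/','-') + split('-') + a parts loop + join.
import Mathlib
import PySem

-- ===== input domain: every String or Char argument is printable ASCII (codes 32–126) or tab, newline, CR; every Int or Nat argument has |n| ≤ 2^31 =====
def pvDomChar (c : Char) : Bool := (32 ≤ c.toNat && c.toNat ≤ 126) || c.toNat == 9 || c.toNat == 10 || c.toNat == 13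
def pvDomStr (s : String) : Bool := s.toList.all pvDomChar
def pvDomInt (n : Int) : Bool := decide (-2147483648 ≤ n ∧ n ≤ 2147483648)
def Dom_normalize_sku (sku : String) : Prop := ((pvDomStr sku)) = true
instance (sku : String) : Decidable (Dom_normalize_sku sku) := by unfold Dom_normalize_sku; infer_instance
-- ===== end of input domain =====

-- B replaces A's replace('/','-') + split('-') + parts loop + join by a single character scan
-- that flushes each token at a separator; same return value on every input.

-- ===== PORT A =====
def normalize_sku (sku : String) : String :=
  if sku = "" then "" else
    let s := PySem.Str.replace sku "/" "-"
    let parts := (PySem.Str.split? s "-").getD []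
    let normalized := parts.foldl (fun acc p =>
      if PySem.Str.strIsdigit p then acc ++ [PySem.Int.toStr ((PySem.Int.ofStr? p).getD 0)]
      else acc ++ [p]) []
    PySem.Str.join "-" normalized

-- ===== PORT B =====
-- _flush(tok): str(int(tok)) if tok.isdigit() else tok
def pvFlush (tok : List Char) : List Char :=
  if PySem.Chars.strIsdigit tok then PySem.Int.toChars ((PySem.Int.ofChars? tok).getD 0) else tok

-- the for-loop of B: state (out, tok), flushing at '-' or '/'
def pvScan : List Char → List Char → List Char → List Char
  | [], out, tok => out ++ pvFlush tok
  | c :: rest, out, tok =>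
    if c = '-' ∨ c = '/' then pvScan rest (out ++ pvFlush tok ++ ['-']) []
    else pvScan rest out (tok ++ [c])

def normalize_sku_alt (sku : String) : String :=
  if sku = "" then "" else String.ofList (pvScan sku.toList [] [])

-- ===== PRECONDITION & SPEC =====
def Spec_normalize_sku (sku : String) (out : String) : Prop := out = normalize_sku_alt sku
instance (sku : String) (out : String) : Decidable (Spec_normalize_sku sku out) := by unfold Spec_normalize_sku; infer_instance

-- ===== CLAIM (what is proved, stated in full; the proofs are below) =====
def Claim_equal_normalize_sku : Prop := ∀ (sku : String), Dom_normalize_sku sku → Spec_normalize_sku sku (normalize_sku sku)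

-- ===== LEMMAS AND PROOFS =====

-- split on '-' or '/' directly (proof-only characterization)
def splitHD : List Char → List (List Char)
  | [] => [[]]
  | c :: cs =>
    if c = '-' ∨ c = '/' then [] :: splitHD cs
    else match splitHD cs with
      | p :: ps => (c :: p) :: ps
      | [] => [[c]]

def consHead (tok : List Char) : List (List Char) → List (List Char)
  | [] => [tok]
  | p :: ps => (tok ++ p) :: ps

theorem splitHD_ne_nil (cs : List Char) : splitHD cs ≠ [] := by
  cases cs with
  | nil => simp [splitHD]
  | cons c cs =>
    simp only [splitHD]
    split
    · simp
    · split <;> simp_all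

theorem consHead_nil (ps : List (List Char)) (h : ps ≠ []) : consHead [] ps = ps := by
  cases ps with
  | nil => exact absurd rfl h
  | cons p ps => simp [consHead]

def pvSubst (c : Char) : Char := if c = '/' then '-' else c

theorem replace_go_single (fuel : Nat) (l acc : List Char) (h : l.length ≤ fuel) :
    PySem.Chars.replace.go ['/'] ['-'] fuel l acc = acc.reverse ++ l.map pvSubst := by
  induction fuel generalizing l acc with
  | zero =>
    cases l with
    | nil => simp [PySem.Chars.replace.go]
    | cons c t => simp at h
  | succ n ih =>
    cases l with
    | nil => simp [PySem.Chars.replace.go]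
    | cons c t =>
      simp only [List.length_cons, Nat.succ_le_succ_iff] at h
      by_cases hc : c = '/'
      · have hpre : List.isPrefixOf ['/'] (c :: t) = true := by
          simp [List.isPrefixOf, hc]
        simp only [PySem.Chars.replace.go, hpre, if_pos]
        rw [ih _ _ (by simpa using h)]
        simp [pvSubst, hc]
      · have hpre : List.isPrefixOf ['/'] (c :: t) = false := by
          simp [List.isPrefixOf]
          exact fun hh => hc hh.symm
        simp only [PySem.Chars.replace.go, hpre]
        rw [if_neg (by simp)]
        rw [ih _ _ h]
        simp [pvSubst, hc]

theorem replace_single (cs : List Char) :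
    PySem.Chars.replace cs ['/'] ['-'] = cs.map pvSubst := by
  have := replace_go_single cs.length cs [] (le_refl _)
  simpa [PySem.Chars.replace] using this

def splitS (cs : List Char) : List (List Char) :=
  match cs with
  | [] => [[]]
  | c :: cs =>
    if c = '-' then [] :: splitS cs
    else match splitS cs with
      | p :: ps => (c :: p) :: ps
      | [] => [[c]]

theorem splitS_ne_nil (cs : List Char) : splitS cs ≠ [] := by
  cases cs with
  | nil => simp [splitS]
  | cons c cs =>
    simp only [splitS]
    split
    · simp
    · split <;> simp_all

theorem splitOn_go_single (fuel : Nat) (l cur : List Char) (acc : List (List Char))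
    (h : l.length ≤ fuel) :
    PySem.Chars.splitOn.go ['-'] fuel l cur acc =
      acc.reverse ++ consHead cur.reverse (splitS l) := by
  induction fuel generalizing l cur acc with
  | zero =>
    cases l with
    | nil => simp [PySem.Chars.splitOn.go, splitS, consHead]
    | cons c t => simp at h
  | succ n ih =>
    cases l with
    | nil => simp [PySem.Chars.splitOn.go, splitS, consHead]
    | cons c t =>
      simp only [List.length_cons, Nat.succ_le_succ_iff] at h
      by_cases hc : c = '-'
      · have hpre : List.isPrefixOf ['-'] (c :: t) = true := by
          simp [List.isPrefixOf, hc]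
        simp only [PySem.Chars.splitOn.go, hpre, if_pos]
        rw [ih _ _ _ (by simpa using h)]
        simp only [show (['-'] : List Char).length = 1 from rfl, List.drop_succ_cons,
          List.drop_zero, List.reverse_nil]
        rw [consHead_nil _ (splitS_ne_nil t)]
        simp [splitS, hc, consHead]
      · have hpre : List.isPrefixOf ['-'] (c :: t) = false := by
          simp [List.isPrefixOf]
          exact fun hh => hc hh.symm
        simp only [PySem.Chars.splitOn.go, hpre]
        rw [if_neg (by simp)]
        rw [ih _ _ _ h]
        simp only [splitS, hc, if_neg (by exact hc)]
        cases hs : splitS t with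
        | nil => exact absurd hs (splitS_ne_nil t)
        | cons p ps => simp [consHead, List.append_assoc]

theorem splitOn_single (cs : List Char) :
    PySem.Chars.splitOn cs ['-'] = splitS cs := by
  have := splitOn_go_single (cs.length + 1) cs [] [] (by omega)
  simpa [PySem.Chars.splitOn, consHead_nil _ (splitS_ne_nil cs)] using this

theorem splitS_map_subst (cs : List Char) : splitS (cs.map pvSubst) = splitHD cs := by
  induction cs with
  | nil => simp [splitS, splitHD]
  | cons c cs ih =>
    by_cases hc : c = '-' ∨ c = '/'
    · have hsub : pvSubst c = '-' := by
        rcases hc with h | h <;> simp [pvSubst, h]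
      simp [splitS, splitHD, hsub, hc, ih]
    · have hcd : ¬ c = '-' := fun h => hc (Or.inl h)
      have hcs : ¬ c = '/' := fun h => hc (Or.inr h)
      have hsub : pvSubst c = c := by simp only [pvSubst, if_neg hcs]
      rw [List.map_cons, hsub]
      simp only [splitS, splitHD, if_neg hcd, if_neg hc, ih]

theorem join_single (x : List Char) : PySem.Chars.join ['-'] [x] = x := by
  simp [PySem.Chars.join, List.intercalate]

theorem pvScan_eq (cs out tok : List Char) :
    pvScan cs out tok =
      out ++ PySem.Chars.join ['-'] ((consHead tok (splitHD cs)).map pvFlush) := by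
  induction cs generalizing out tok with
  | nil => simp [pvScan, splitHD, consHead, join_single]
  | cons c cs ih =>
    by_cases hc : c = '-' ∨ c = '/'
    · simp only [pvScan, if_pos hc, splitHD, hc, if_pos hc]
      rw [ih]
      rw [consHead_nil _ (splitHD_ne_nil cs)]
      cases hs : splitHD cs with
      | nil => exact absurd hs (splitHD_ne_nil cs)
      | cons p ps =>
        simp [consHead, PySem.Chars.join_cons_cons]
    · simp only [pvScan, if_neg hc, splitHD, if_neg hc]
      rw [ih]
      cases hs : splitHD cs with
      | nil => exact absurd hs (splitHD_ne_nil cs)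
      | cons p ps => simp [consHead, List.append_assoc]

theorem foldl_if_append (g : String → Bool) (f : String → String)
    (parts : List String) (acc : List String) :
    parts.foldl (fun acc p => if g p then acc ++ [f p] else acc ++ [p]) acc =
      acc ++ parts.map (fun p => if g p then f p else p) := by
  induction parts generalizing acc with
  | nil => simp
  | cons p ps ih =>
    simp only [List.foldl_cons, List.map_cons]
    by_cases hg : g p = true
    · rw [if_pos hg, ih, if_pos hg]; simp
    · rw [if_neg hg, ih, if_neg hg]; simp

-- ===== VERDICT (by name: the statement is the Claim_ definition above) =====
theorem normalize_sku_spec : Claim_equal_normalize_sku := by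
  intro sku _
  unfold Spec_normalize_sku
  by_cases h : sku = ""
  · simp [normalize_sku, normalize_sku_alt, h]
  · have key : (normalize_sku sku).toList = (normalize_sku_alt sku).toList := by
      simp only [normalize_sku, normalize_sku_alt, if_neg h]
      rw [foldl_if_append]
      rw [PySem.Str.toList_join]
      rw [List.nil_append, List.map_map]
      have hparts :
          ((PySem.Str.split? (PySem.Str.replace sku "/" "-") "-").getD []).map String.toList
            = splitHD sku.toList := by
        have hb := PySem.Str.split?_map (PySem.Str.replace sku "/" "-") "-"
        have hsep : ("-" : String).toList = ['-'] := by decide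
        rw [hsep] at hb
        have hrep : (PySem.Str.replace sku "/" "-").toList
            = sku.toList.map pvSubst := by
          rw [PySem.Str.toList_replace]
          have h1 : ("/" : String).toList = ['/'] := by decide
          rw [h1, hsep, replace_single]
        rw [hrep] at hb
        have hsplit : PySem.Chars.split? (sku.toList.map pvSubst) ['-']
            = some (splitHD sku.toList) := by
          rw [show PySem.Chars.split? (sku.toList.map pvSubst) ['-']
              = some (PySem.Chars.splitOn (sku.toList.map pvSubst) ['-']) from by
            simp [PySem.Chars.split?]]
          rw [splitOn_single, splitS_map_subst]
        rw [hsplit] at hb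
        cases hq : PySem.Str.split? (PySem.Str.replace sku "/" "-") "-" with
        | none => rw [hq] at hb; simp at hb
        | some l =>
          rw [hq] at hb
          simp only [Option.map_some, Option.some.injEq] at hb
          simpa [hq] using hb
      have hmap : ∀ p : String,
          (if PySem.Str.strIsdigit p = true
            then PySem.Int.toStr ((PySem.Int.ofStr? p).getD 0) else p).toList
          = pvFlush p.toList := by
        intro p
        by_cases hd : PySem.Str.strIsdigit p = true
        · rw [if_pos hd]
          have hd' : PySem.Chars.strIsdigit p.toList = true := by
            rwa [PySem.Str.strIsdigit_eq] at hd
          rw [PySem.Int.toList_toStr]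
          simp [pvFlush, hd']
          rfl
        · rw [if_neg hd]
          have hd' : ¬ PySem.Chars.strIsdigit p.toList = true := by
            rwa [PySem.Str.strIsdigit_eq] at hd
          simp [pvFlush, hd']
      calc PySem.Chars.join ("-" : String).toList
            (((PySem.Str.split? (PySem.Str.replace sku "/" "-") "-").getD []).map
              (fun p => String.toList (if PySem.Str.strIsdigit p = true
                then PySem.Int.toStr ((PySem.Int.ofStr? p).getD 0) else p)))
          = PySem.Chars.join ['-']
            ((((PySem.Str.split? (PySem.Str.replace sku "/" "-") "-").getD []).map
              String.toList).map pvFlush) := by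
            rw [show ("-" : String).toList = ['-'] from by decide, List.map_map]
            congr 1
            apply List.map_congr_left
            intro p _
            exact hmap p
        _ = PySem.Chars.join ['-'] ((splitHD sku.toList).map pvFlush) := by rw [hparts]
        _ = (String.ofList (pvScan sku.toList [] [])).toList := by
            rw [pvScan_eq, consHead_nil _ (splitHD_ne_nil sku.toList)]
            simp
    exact String.toList_injective key
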